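-- pv_equiv track=rewrite | github.com/n-serrette/Cluster_Index | Cluster_Index_lib/cluster_index_lib/internal_index.py | compute_pairs_count
-- ===== SOURCE A (Python) =====
-- def compute_pairs_count(labels):
--     """Pair count
--
--         Nt total number of pair
--
--         Nb the number of pairs constituted of points which do not
--          belong to the same cluster
--
--         Nw the number of pairs constituted of points which belong
--         to the same cluster
--     """
--     Nt = 0
--     Nb = 0
--     Nw = 0
--     for i in range(len(labels)):
--         for j in range(i):
--             Nt += 1
--             if labels[i] == labels[j]:
--                 Nw += 1
--             else:
--                 Nb += 1
--     return (Nt, Nw, Nb)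
-- ===== SOURCE B (Python) =====
-- def compute_pairs_count(labels):
--     """Pair count via cluster sizes: O(n) instead of A's O(n^2) double loop."""
--     counts = {}
--     for x in labels:
--         counts[x] = counts.get(x, 0) + 1
--     n = len(labels)
--     Nt = n * (n - 1) // 2
--     Nw = sum(c * (c - 1) // 2 for c in counts.values())
--     return (Nt, Nw, Nt - Nw)
-- ===== Notes on version B (the rewrite author's own statement) =====
-- stated objective: faster
-- what changed: Replaces the O(n^2) double loop over index pairs by a single pass building a dict of cluster sizes, then computes Nt=n(n-1)/2, Nw=sum c(c-1)/2 and Nb=Nt-Nw in closed form.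
import Mathlib
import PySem

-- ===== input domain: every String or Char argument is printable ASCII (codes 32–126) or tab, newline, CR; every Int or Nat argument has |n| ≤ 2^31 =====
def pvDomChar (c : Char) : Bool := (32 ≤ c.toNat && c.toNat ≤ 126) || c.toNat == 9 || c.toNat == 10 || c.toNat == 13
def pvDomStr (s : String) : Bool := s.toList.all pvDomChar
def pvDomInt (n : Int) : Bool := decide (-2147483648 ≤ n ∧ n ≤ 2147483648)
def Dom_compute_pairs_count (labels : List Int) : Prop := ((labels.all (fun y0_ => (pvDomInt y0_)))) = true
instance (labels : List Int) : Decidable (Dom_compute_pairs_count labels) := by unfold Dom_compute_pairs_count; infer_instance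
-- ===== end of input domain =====

-- B replaces A's O(n^2) double loop by a one-pass dict of cluster sizes and closed-form pair counts (objective: faster, asymptotic).


-- ===== PORT A =====
-- inner loop 'for j in range(i): …' of A, acting on the state (Nt, Nw, Nb)
def pcOuterStep (labels : List Int) (st : Int × Int × Int) (i : Int) : Int × Int × Int :=
  (PySem.List.pyRange 0 i).foldl (fun st j =>
    let Nt := st.1 + 1
    if PySem.List.pyGetD labels i 0 = PySem.List.pyGetD labels j 0 then
      (Nt, st.2.1 + 1, st.2.2)
    else
      (Nt, st.2.1, st.2.2 + 1)) st

def compute_pairs_count (labels : List Int) : List Int :=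
  let s := (PySem.List.pyRange 0 (PySem.List.len labels)).foldl (pcOuterStep labels) (0, 0, 0)
  [s.1, s.2.1, s.2.2]

-- ===== PORT B =====
def compute_pairs_count_alt (labels : List Int) : List Int :=
  let counts := labels.foldl (fun (d : PySem.Dict Int Int) x => d.insert x (d.getD x 0 + 1)) PySem.Dict.empty
  let n : Int := PySem.List.len labels
  let Nt := PySem.Int.floordiv (n * (n - 1)) 2
  let Nw := (counts.values.map (fun c => PySem.Int.floordiv (c * (c - 1)) 2)).sum
  [Nt, Nw, Nt - Nw]

-- ===== PRECONDITION & SPEC =====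
def Spec_compute_pairs_count (labels : List Int) (out : List Int) : Prop := out = compute_pairs_count_alt labels
instance (labels : List Int) (out : List Int) : Decidable (Spec_compute_pairs_count labels out) := by unfold Spec_compute_pairs_count; infer_instance

-- ===== CLAIM (what is proved, stated in full; the proofs are below) =====
def Claim_equal_compute_pairs_count : Prop := ∀ (labels : List Int), Dom_compute_pairs_count labels → Spec_compute_pairs_count labels (compute_pairs_count labels)

-- ===== LEMMAS AND PROOFS =====

-- T n = number of pairs among n points; W l = number of same-label pairs, as B computes it
def pcT (n : Nat) : Nat := n * (n - 1) / 2
def pcW (l : List Int) : Nat := ((PySem.Set.ofList l).map (fun k => pcT (l.count k))).sum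

lemma pcT_succ (n : Nat) : pcT (n + 1) = pcT n + n := Nat.triangle_succ n

lemma floordiv_tri (m : Nat) :
    PySem.Int.floordiv ((m : Int) * ((m : Int) - 1)) 2 = (pcT m : Int) := by
  cases m with
  | zero => decide
  | succ k =>
      have h : ((k + 1 : Nat) : Int) * (((k + 1 : Nat) : Int) - 1) = (((k + 1) * k : Nat) : Int) := by
        push_cast; ring
      rw [h, show (2 : Int) = ((2 : Nat) : Int) from rfl, PySem.Int.floordiv_natCast]
      simp [pcT]

lemma pyGetD_append_left (l : List Int) (x : Int) {i : Int} (h0 : 0 ≤ i) (h1 : i < (l.length : Int)) :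
    PySem.List.pyGetD (l ++ [x]) i 0 = PySem.List.pyGetD l i 0 := by
  rw [PySem.List.pyGetD_eq_getElem _ _ h0 (by simp; omega),
      PySem.List.pyGetD_eq_getElem _ _ h0 h1,
      List.getElem_append_left (by omega)]

lemma pcW_append (l : List Int) (x : Int) : pcW (l ++ [x]) = pcW l + l.count x := by
  have hcount : ∀ k : Int, (l ++ [x]).count k = l.count k + if x = k then 1 else 0 := by
    intro k; simp [List.count_append, List.count_singleton, beq_iff_eq]
  have hset : PySem.Set.ofList (l ++ [x]) = PySem.Set.add (PySem.Set.ofList l) x := by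
    simp [PySem.Set.ofList_append, PySem.Set.update]
  by_cases hx : x ∈ l
  · have hmem : x ∈ PySem.Set.ofList l := (PySem.Set.mem_ofList l x).mpr hx
    have hadd : PySem.Set.add (PySem.Set.ofList l) x = PySem.Set.ofList l := by
      simp [PySem.Set.add, hx]
    have hnd := PySem.Set.nodup_ofList l
    have hperm : (PySem.Set.ofList l : List Int).Perm (x :: (PySem.Set.ofList l : List Int).erase x) :=
      List.perm_cons_erase hmem
    have hsum : ∀ (g : Int → Nat),
        ((PySem.Set.ofList l : List Int).map g).sum
          = g x + (((PySem.Set.ofList l : List Int).erase x).map g).sum := by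
      intro g
      rw [(hperm.map g).sum_eq]; simp
    simp only [pcW, hset, hadd]
    rw [hsum, hsum fun k => pcT (l.count k)]
    have herase : (((PySem.Set.ofList l : List Int).erase x).map (fun k => pcT ((l ++ [x]).count k)))
        = (((PySem.Set.ofList l : List Int).erase x).map (fun k => pcT (l.count k))) := by
      apply List.map_congr_left
      intro k hk
      have hne : k ≠ x := ((List.Nodup.mem_erase_iff hnd).mp hk).1
      rw [hcount k, if_neg (fun h => hne h.symm), Nat.add_zero]
    rw [herase, hcount x, if_pos rfl, pcT_succ]
    omega
  · have hmem : x ∉ PySem.Set.ofList l := fun h => hx ((PySem.Set.mem_ofList l x).mp h)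
    have hadd : PySem.Set.add (PySem.Set.ofList l) x = (PySem.Set.ofList l : List Int) ++ [x] := by
      simp [PySem.Set.add, hx]
    have hc0 : l.count x = 0 := List.count_eq_zero_of_not_mem hx
    simp only [pcW, hset, hadd]
    rw [List.map_append, List.sum_append]
    have hrest : ((PySem.Set.ofList l : List Int).map (fun k => pcT ((l ++ [x]).count k)))
        = ((PySem.Set.ofList l : List Int).map (fun k => pcT (l.count k))) := by
      apply List.map_congr_left
      intro k hk
      have hne : x ≠ k := fun h => hmem (h ▸ hk)
      rw [hcount k, if_neg hne, Nat.add_zero]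
    rw [hrest]
    simp [hc0, pcT]

lemma inner_fold (l : List Int) (x : Int) (st : Int × Int × Int) :
    l.foldl (fun st y =>
      let Nt := st.1 + 1
      if x = y then (Nt, st.2.1 + 1, st.2.2) else (Nt, st.2.1, st.2.2 + 1)) st
    = (st.1 + l.length, st.2.1 + l.count x, st.2.2 + ((l.length : Int) - l.count x)) := by
  induction l generalizing st with
  | nil => simp
  | cons a t ih =>
      simp only [List.foldl_cons, ih, List.count_cons, List.length_cons]
      by_cases h : x = a
      · simp only [if_pos h, show (a == x) = true by simp [h], if_true]
        simp only [Prod.mk.injEq]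
        push_cast
        refine ⟨by ring, by ring, by ring⟩
      · simp only [if_neg h, show (a == x) = false by simp [beq_eq_false_iff_ne]; exact fun hh => h hh.symm]
        simp only [Prod.mk.injEq]
        push_cast
        refine ⟨by ring, by ring, by ring⟩

lemma pcOuterStep_agree (l : List Int) (x : Int) (st : Int × Int × Int) (i : Int)
    (h0 : 0 ≤ i) (h1 : i < (l.length : Int)) :
    pcOuterStep (l ++ [x]) st i = pcOuterStep l st i := by
  unfold pcOuterStep
  apply PySem.List.foldl_congr_mem
  intro acc j hj
  have hj' := (PySem.List.mem_pyRange_one).mp hj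
  rw [pyGetD_append_left l x h0 h1, pyGetD_append_left l x hj'.1 (by omega)]

lemma foldA (l : List Int) :
    (PySem.List.pyRange 0 (PySem.List.len l)).foldl (pcOuterStep l) (0, 0, 0)
      = ((pcT l.length : Int), (pcW l : Int), (pcT l.length : Int) - (pcW l : Int)) := by
  induction l using List.reverseRecOn with
  | nil => simp [pcT, pcW, PySem.Set.ofList]
  | append_singleton t x ih =>
      have hlen : PySem.List.len (t ++ [x]) = (t.length : Int) + 1 := by
        simp [PySem.List.len_eq]
      rw [hlen, PySem.List.pyRange_one_succ_right (by positivity),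
          List.foldl_append]
      have hcongr : (PySem.List.pyRange 0 (t.length : Int)).foldl (pcOuterStep (t ++ [x])) (0, 0, 0)
          = (PySem.List.pyRange 0 (t.length : Int)).foldl (pcOuterStep t) (0, 0, 0) := by
        apply PySem.List.foldl_congr_mem
        intro acc i hi
        have hi' := (PySem.List.mem_pyRange_one).mp hi
        exact pcOuterStep_agree t x acc i hi'.1 hi'.2
      rw [show PySem.List.pyRange 0 (PySem.List.len t) = PySem.List.pyRange 0 (t.length : Int) by
            simp [PySem.List.len_eq]] at ih
      rw [hcongr, ih]
      simp only [List.foldl_cons, List.foldl_nil]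
      unfold pcOuterStep
      have hx : PySem.List.pyGetD (t ++ [x]) (t.length : Int) 0 = x := by
        rw [PySem.List.pyGetD_eq_getElem _ _ (by positivity) (by simp)]
        simp
      have hbody : (PySem.List.pyRange 0 (t.length : Int)).foldl
          (fun st j =>
            let Nt := st.1 + 1
            if PySem.List.pyGetD (t ++ [x]) (t.length : Int) 0 = PySem.List.pyGetD (t ++ [x]) j 0 then
              (Nt, st.2.1 + 1, st.2.2)
            else (Nt, st.2.1, st.2.2 + 1))
          ((pcT t.length : Int), (pcW t : Int), (pcT t.length : Int) - (pcW t : Int))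
          = (PySem.List.pyRange 0 (t.length : Int)).foldl
          (fun st j =>
            let Nt := st.1 + 1
            if x = PySem.List.pyGetD t j 0 then (Nt, st.2.1 + 1, st.2.2)
            else (Nt, st.2.1, st.2.2 + 1))
          ((pcT t.length : Int), (pcW t : Int), (pcT t.length : Int) - (pcW t : Int)) := by
        apply PySem.List.foldl_congr_mem
        intro acc j hj
        have hj' := (PySem.List.mem_pyRange_one).mp hj
        rw [hx, pyGetD_append_left t x hj'.1 hj'.2]
      rw [hbody,
          show PySem.List.pyRange 0 (t.length : Int) = PySem.List.pyRange 0 (PySem.List.len t) by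
            simp [PySem.List.len_eq],
          PySem.List.foldl_pyRange_zero_pyGetD t 0
            (fun st y => if x = y then (st.1 + 1, st.2.1 + 1, st.2.2) else (st.1 + 1, st.2.1, st.2.2 + 1)),
          inner_fold, pcW_append]
      simp only [List.length_append, List.length_singleton, pcT_succ]
      simp only [Prod.mk.injEq]
      push_cast
      refine ⟨by ring, by ring, by ring⟩

lemma alt_closed (l : List Int) :
    compute_pairs_count_alt l
      = [(pcT l.length : Int), (pcW l : Int), (pcT l.length : Int) - (pcW l : Int)] := by
  unfold compute_pairs_count_alt
  dsimp only
  rw [PySem.Dict.foldl_insert_getD_add_one_eq_counter]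
  have hvals : (PySem.Dict.counter l).values = (PySem.Set.ofList l).map (fun k => ((l.count k : Nat) : Int)) := by
    rw [PySem.Dict.values, PySem.Dict.items_counter, List.map_map]
    rfl
  have hlen : PySem.List.len l = (l.length : Int) := by simp [PySem.List.len_eq]
  rw [hvals, hlen, List.map_map]
  have hmap : ((PySem.Set.ofList l : List Int).map
      ((fun c => PySem.Int.floordiv (c * (c - 1)) 2) ∘ fun k => ((l.count k : Nat) : Int)))
      = ((PySem.Set.ofList l : List Int).map (fun k => (pcT (l.count k) : Int))) := by
    apply List.map_congr_left
    intro k _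
    exact floordiv_tri (l.count k)
  rw [hmap, floordiv_tri l.length]
  have hsum : ((PySem.Set.ofList l : List Int).map (fun k => (pcT (l.count k) : Int))).sum = (pcW l : Int) := by
    rw [pcW]
    push_cast
    rw [List.map_map]
    rfl
  rw [hsum]

-- ===== VERDICT (by name: the statement is the Claim_ definition above) =====
theorem compute_pairs_count_spec : Claim_equal_compute_pairs_count := by
  intro labels _
  unfold Spec_compute_pairs_count
  rw [alt_closed]
  unfold compute_pairs_count
  rw [foldA]
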